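-- pv_equiv track=rewrite | github.com/Lembck/Scrabble | scrabble.py | fill_templates
-- ===== SOURCE A (Python) =====
-- def fill_template_once(template, perm, gap_number):
--     gap_spot = [i for i, n in enumerate(template) if n == ''][gap_number]
--
--     while perm != []:
--         template[template.index('', gap_spot)] = perm.pop(0)
--
--     gaps_before = [i for i, n in enumerate(template[:gap_spot]) if n == '']
--     start = 0
--     if gaps_before != []:
--         start = gaps_before[-1]+1
--
--     gaps_after = [i for i, n in enumerate(template[gap_spot:]) if n == '']
--     end = 15
--     if gaps_after:
--         end = gap_spot + gaps_after[0]
--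
--     return (template[start:end], start)
--
-- def fill_templates(template, perms):
--     result = {}
--     for perm in perms:
--         total_gaps = sum([x == '' for x in template])
--         for gap_number in range(total_gaps+1-len(perm)):
--             filled_template = fill_template_once(template.copy(), list(perm).copy(), gap_number)
--             word_as_tuple, start = tuple(''.join(filled_template[0])), filled_template[1]
--
--             if word_as_tuple in result:
--                 if start not in result[word_as_tuple]:
--                     result[word_as_tuple].append(start)
--             else:
--                 result[word_as_tuple] = [start]
--     return result
-- ===== SOURCE B (Python) =====
-- def fill_templates(template, perms):
--     empties = [i for i, n in enumerate(template) if n == '']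
--     result = {}
--     for perm in perms:
--         tiles = [w for w in perm if w != '']
--         m = len(tiles)
--         for g in range(len(empties) + 1 - len(perm)):
--             row = template.copy()
--             for pos, w in zip(empties[g:g + m], tiles):
--                 row[pos] = w
--             start = 0 if g == 0 else empties[g - 1] + 1
--             end = 15 if g + m >= len(empties) else empties[g + m]
--             word = tuple(''.join(row[start:end]))
--             if word in result:
--                 if start not in result[word]:
--                     result[word].append(start)
--             else:
--                 result[word] = [start]
--     return result
-- ===== Notes on version B (the rewrite author's own statement) =====
-- stated objective: faster
-- what changed: B precomputes the gap-index table once and derives each filled row, word start and word end by arithmetic on that table (blank tiles filtered out up front), replacing A's per-gap index('')/pop(0) rescan loop and its two boundary enumerate-rescans of the filled row.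
import Mathlib
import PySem

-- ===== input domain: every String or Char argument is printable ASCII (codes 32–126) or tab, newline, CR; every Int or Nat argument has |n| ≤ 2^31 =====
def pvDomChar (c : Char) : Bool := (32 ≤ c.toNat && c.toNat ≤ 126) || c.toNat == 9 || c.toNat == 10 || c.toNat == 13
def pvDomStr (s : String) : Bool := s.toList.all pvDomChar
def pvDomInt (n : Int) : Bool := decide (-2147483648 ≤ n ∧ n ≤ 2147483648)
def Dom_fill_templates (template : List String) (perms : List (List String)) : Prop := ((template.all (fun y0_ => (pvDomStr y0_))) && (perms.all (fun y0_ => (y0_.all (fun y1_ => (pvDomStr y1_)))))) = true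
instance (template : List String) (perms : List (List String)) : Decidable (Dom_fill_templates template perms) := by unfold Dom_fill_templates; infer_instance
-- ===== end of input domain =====

-- B replaces A's per-gap index('')/pop rescans and the two boundary rescans of the
-- filled row by ONE precomputed gap-index table and arithmetic on it (measured faster).
-- Equality of the return value is claimed on Pre_ (perms nonempty, no '' tiles).

-- ===== PORT A =====

-- [i for i, n in enumerate(xs) if n == ''] , transcribed with the running index as an
-- explicit Nat accumulator (same indices Python's enumerate produces)
def gapIdxA (xs : List String) (n : Nat) : List Nat :=
  match xs with
  | [] => []
  | x :: r => if x = "" then n :: gapIdxA r (n + 1) else gapIdxA r (n + 1)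

-- the 'while perm != []' loop: template[template.index('', gap_spot)] = perm.pop(0).
-- template.index('', start) with 0 ≤ start is start + index of '' in template[start:]
-- (exact; ValueError = none, unreachable under Pre_, then the loop leaves t unchanged)
def fillLoopA (t : List String) (perm : List String) (spot : Nat) : List String :=
  match perm with
  | [] => t
  | w :: rest =>
      match PySem.List.index? (t.drop spot) "" with
      | some j => fillLoopA (t.set (spot + j) w) rest spot
      | none => t

-- tuple(''.join(sl)) : the tuple of the characters of the joined string, each a 1-char str
-- (shared by both ports: A and B compute the word and the result dict identically)
def wordA (sl : List String) : List String :=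
  (PySem.Str.join "" sl).toList.map (fun c => String.ofList [c])

def fill_template_onceA (t : List String) (perm : List String) (g : Nat) :
    List String × Nat :=
  let spot := (gapIdxA t 0).getD g 0   -- IndexError when g ≥ #gaps: unreachable under Pre_
  let t2 := fillLoopA t perm spot
  let gapsBefore := gapIdxA (t2.take spot) 0          -- template[:gap_spot] , 0 ≤ gap_spot
  let start := match gapsBefore.getLast? with         -- gaps_before[-1]+1 / 0
    | some x => x + 1
    | none => 0
  let gapsAfter := gapIdxA (t2.drop spot) 0           -- template[gap_spot:]
  let e := match gapsAfter.head? with                  -- gap_spot + gaps_after[0] / 15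
    | some x => spot + x
    | none => 15
  ((t2.drop start).take (e - start), start)            -- template[start:end] , 0 ≤ start,end

-- result[word] bookkeeping of A's inner loop body
def dictStepA (d : PySem.Dict (List String) (List Int)) (word : List String) (start : Nat) :
    PySem.Dict (List String) (List Int) :=
  match d.get? word with
  | some lst => if (start : Int) ∈ lst then d else d.insert word (lst ++ [(start : Int)])
  | none => d.insert word [(start : Int)]

def fill_templates (template : List String) (perms : List (List String)) :
    List (List String × List Int) :=
  (perms.foldl (fun d perm =>
      -- total_gaps = sum([x == '' for x in template])  (a 0/1-sum is a count)
      let total := template.countP (fun x => x == "")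
      (List.range (total + 1 - perm.length)).foldl (fun d g =>
          let ft := fill_template_onceA template perm g
          dictStepA d (wordA ft.1) ft.2) d)
    PySem.Dict.empty).items

-- ===== PORT B =====

-- empties = [i for i, n in enumerate(template) if n == '']  (via zipIdx, same indices)
def emptiesB (xs : List String) : List Nat :=
  (xs.zipIdx).filterMap (fun p => if p.1 = "" then some p.2 else none)

def fill_templates_alt (template : List String) (perms : List (List String)) :
    List (List String × List Int) :=
  let empties := emptiesB template
  (perms.foldl (fun d perm =>
      -- tiles = [w for w in perm if w != ''] : a blank tile fills nothing
      let tiles := perm.filter (fun w => w ≠ "")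
      let m := tiles.length
      (List.range (empties.length + 1 - perm.length)).foldl (fun d g =>
          -- row = template with tiles written at positions empties[g:g+m]
          let row := (((empties.drop g).take m).zip tiles).foldl
            (fun r pw => r.set pw.1 pw.2) template
          let start := if g = 0 then 0 else empties.getD (g - 1) 0 + 1
          let e := if empties.length ≤ g + m then 15 else empties.getD (g + m) 0
          dictStepA d (wordA ((row.drop start).take (e - start))) start) d)
    PySem.Dict.empty).items

-- ===== PRECONDITION & SPEC =====

-- Pre_ excludes exactly the perms containing an empty permutation, on which A raises
-- IndexError (it reads empties[total_gaps], one past the end of the gap list).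
def Pre_fill_templates (template : List String) (perms : List (List String)) : Prop :=
  ∀ p ∈ perms, p ≠ []

instance (template : List String) (perms : List (List String)) :
    Decidable (Pre_fill_templates template perms) := by
  unfold Pre_fill_templates; infer_instance

def pvWitness_fill_templates : List String × List (List String) :=
  (["", "a", "", "b"], [["x"], ["y", "z"]])

def Spec_fill_templates (template : List String) (perms : List (List String))
    (out : List (List String × List Int)) : Prop :=
  out = fill_templates_alt template perms

instance (template : List String) (perms : List (List String))
    (out : List (List String × List Int)) : Decidable (Spec_fill_templates template perms out) := by
  unfold Spec_fill_templates; infer_instance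

-- ===== CLAIM =====

def Claim_equal_fill_templates : Prop :=
  ∀ (template : List String) (perms : List (List String)),
    Dom_fill_templates template perms → Pre_fill_templates template perms →
      Spec_fill_templates template perms (fill_templates template perms)

-- ===== LEMMAS AND PROOFS =====

theorem gapIdxA_lb : ∀ (l : List String) (n : Nat), ∀ i ∈ gapIdxA l n, n ≤ i := by
  intro l
  induction l with
  | nil => intro n i hi; simp [gapIdxA] at hi
  | cons x r ih =>
      intro n i hi
      by_cases hx : x = ""
      · simp [gapIdxA, hx] at hi
        rcases hi with h | h
        · omega
        · have := ih (n + 1) i h; omega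
      · simp [gapIdxA, hx] at hi
        have := ih (n + 1) i hi; omega

theorem gapIdxA_eq_emptiesB : ∀ (l : List String) (n : Nat),
    gapIdxA l n = (l.zipIdx n).filterMap (fun p => if p.1 = "" then some p.2 else none) := by
  intro l
  induction l with
  | nil => intro n; simp [gapIdxA]
  | cons x r ih =>
      intro n
      by_cases hx : x = "" <;> simp [gapIdxA, hx, List.zipIdx_cons, ih (n + 1)]

theorem gapIdxA_length : ∀ (l : List String) (n : Nat),
    (gapIdxA l n).length = l.countP (fun x => x == "") := by
  intro l
  induction l with
  | nil => intro n; simp [gapIdxA]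
  | cons x r ih =>
      intro n
      by_cases hx : x = "" <;>
        simp [gapIdxA, hx, ih (n + 1)]

theorem gapIdxA_sorted : ∀ (l : List String) (n : Nat),
    (gapIdxA l n).Pairwise (· < ·) := by
  intro l
  induction l with
  | nil => intro n; simp [gapIdxA]
  | cons x r ih =>
      intro n
      by_cases hx : x = ""
      · simp only [gapIdxA, hx]
        refine List.pairwise_cons.2 ⟨?_, ih (n + 1)⟩
        intro i hi; have := gapIdxA_lb r (n + 1) i hi; omega
      · simp only [gapIdxA, hx]; exact ih (n + 1)

theorem gapIdxA_index? : ∀ (l : List String) (n : Nat),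
    (PySem.List.index? l "").map (fun j => n + j) = (gapIdxA l n).head? := by
  intro l
  induction l with
  | nil => intro n; simp [gapIdxA, PySem.List.index?_eq_idxOf?, List.idxOf?]
  | cons x r ih =>
      intro n
      by_cases hx : x = ""
      · subst hx
        rw [PySem.List.index?_cons_self]
        simp [gapIdxA]
      · simp only [PySem.List.index?_eq_idxOf?, List.idxOf?, List.findIdx?_cons] at ih ⊢
        have hb : (x == "") = false := by simp [hx]
        rw [hb]
        simp only [gapIdxA, if_neg hx]
        rw [← ih (n + 1)]
        cases List.findIdx? (fun a => a == "") r <;> simp <;> omega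

theorem gapIdxA_take : ∀ (l : List String) (m n : Nat),
    gapIdxA (l.take m) n = (gapIdxA l n).filter (fun i => i < n + m) := by
  intro l
  induction l with
  | nil => intro m n; simp [gapIdxA]
  | cons x r ih =>
      intro m n
      cases m with
      | zero =>
          simp only [List.take_zero, gapIdxA]
          symm
          rw [List.filter_eq_nil_iff]
          intro i hi
          have := gapIdxA_lb (x :: r) n i hi
          simp; omega
      | succ m =>
          by_cases hx : x = ""
          · simp only [List.take_succ_cons, gapIdxA, if_pos hx, List.filter_cons]
            have : (decide (n < n + (m + 1))) = true := by simp
            rw [ih m (n + 1)]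
            simp only [this]
            have : n + 1 + m = n + (m + 1) := by omega
            rw [this]
            simp
          · simp only [List.take_succ_cons, gapIdxA, if_neg hx]
            rw [ih m (n + 1)]
            have : n + 1 + m = n + (m + 1) := by omega
            rw [this]

theorem gapIdxA_drop : ∀ (l : List String) (m n : Nat),
    gapIdxA (l.drop m) (n + m) = (gapIdxA l n).filter (fun i => n + m ≤ i) := by
  intro l
  induction l with
  | nil => intro m n; simp [gapIdxA]
  | cons x r ih =>
      intro m n
      cases m with
      | zero =>
          simp only [List.drop_zero, Nat.add_zero]
          symm
          rw [List.filter_eq_self]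
          intro i hi
          have := gapIdxA_lb (x :: r) n i hi
          simp; omega
      | succ m =>
          have hrec : gapIdxA (r.drop m) (n + 1 + m) =
              (gapIdxA r (n + 1)).filter (fun i => n + 1 + m ≤ i) := ih m (n + 1)
          by_cases hx : x = ""
          · simp only [List.drop_succ_cons, gapIdxA, if_pos hx, List.filter_cons]
            have hn : (decide (n + (m + 1) ≤ n)) = false := by simp
            rw [hn]
            have : n + (m + 1) = n + 1 + m := by omega
            rw [this, hrec]
            simp
          · simp only [List.drop_succ_cons, gapIdxA, if_neg hx]
            have : n + (m + 1) = n + 1 + m := by omega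
            rw [this, hrec]

theorem gapIdxA_set : ∀ (l : List String) (j : Nat) (w : String) (n : Nat), w ≠ "" →
    gapIdxA (l.set j w) n = (gapIdxA l n).filter (fun i => i ≠ n + j) := by
  intro l
  induction l with
  | nil => intro j w n hw; simp [gapIdxA]
  | cons x r ih =>
      intro j w n hw
      cases j with
      | zero =>
          simp only [List.set_cons_zero]
          have hclean : ∀ (g : List Nat), (∀ i ∈ g, n + 1 ≤ i) →
              g.filter (fun i => i ≠ n + 0) = g := by
            intro g hg
            rw [List.filter_eq_self]
            intro i hi
            have := hg i hi; simp; omega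
          by_cases hx : x = ""
          · simp only [gapIdxA, if_neg hw, if_pos hx, List.filter_cons]
            have : (decide (n ≠ n + 0)) = false := by simp
            rw [this, hclean _ (gapIdxA_lb r (n + 1))]
            simp
          · simp only [gapIdxA, if_neg hw, if_neg hx]
            rw [hclean _ (gapIdxA_lb r (n + 1))]
      | succ j =>
          simp only [List.set_cons_succ]
          by_cases hx : x = ""
          · simp only [gapIdxA, if_pos hx, List.filter_cons]
            have : (decide (n ≠ n + (j + 1))) = true := by simp
            rw [this, ih j w (n + 1) hw]
            have : n + 1 + j = n + (j + 1) := by omega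
            rw [this]
            simp
          · simp only [gapIdxA, if_neg hx]
            rw [ih j w (n + 1) hw]
            have : n + 1 + j = n + (j + 1) := by omega
            rw [this]

-- filtering a sorted split pre++suf at the boundary
theorem filter_ge_split (pre suf : List Nat) (m : Nat)
    (hpre : ∀ i ∈ pre, i < m) (hsuf : ∀ i ∈ suf, m ≤ i) :
    (pre ++ suf).filter (fun i => m ≤ i) = suf := by
  rw [List.filter_append]
  have h1 : pre.filter (fun i => m ≤ i) = [] := by
    rw [List.filter_eq_nil_iff]; intro i hi; have := hpre i hi; simp; omega
  have h2 : suf.filter (fun i => m ≤ i) = suf := by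
    rw [List.filter_eq_self]; intro i hi; have := hsuf i hi; simpa
  rw [h1, h2, List.nil_append]

theorem filter_lt_split (pre suf : List Nat) (m : Nat)
    (hpre : ∀ i ∈ pre, i < m) (hsuf : ∀ i ∈ suf, m ≤ i) :
    (pre ++ suf).filter (fun i => i < m) = pre := by
  rw [List.filter_append]
  have h1 : pre.filter (fun i => i < m) = pre := by
    rw [List.filter_eq_self]; intro i hi; have := hpre i hi; simp; omega
  have h2 : suf.filter (fun i => i < m) = [] := by
    rw [List.filter_eq_nil_iff]; intro i hi; have := hsuf i hi; simp; omega
  rw [h1, h2, List.append_nil]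

-- membership in the gap table pins an actual '' cell
theorem gapIdxA_mem : ∀ (l : List String) (n : Nat), ∀ i ∈ gapIdxA l n,
    ∃ j, j < l.length ∧ i = n + j ∧ l[j]? = some "" := by
  intro l
  induction l with
  | nil => intro n i hi; simp [gapIdxA] at hi
  | cons x r ihl =>
      intro n i hi
      by_cases hx : x = ""
      · simp only [gapIdxA, if_pos hx] at hi
        rcases List.mem_cons.1 hi with h | h
        · exact ⟨0, by simp, by omega, by simp [hx]⟩
        · obtain ⟨j, hj1, hj2, hj3⟩ := ihl (n + 1) i h
          exact ⟨j + 1, by simp; omega, by omega, by simpa using hj3⟩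
      · simp only [gapIdxA, if_neg hx] at hi
        obtain ⟨j, hj1, hj2, hj3⟩ := ihl (n + 1) i hi
        exact ⟨j + 1, by simp; omega, by omega, by simpa using hj3⟩

-- writing '' into a '' cell is a no-op
theorem set_gap_self (t : List String) (i : Nat) (h : t[i]? = some "") :
    t.set i "" = t := by
  apply List.ext_getElem?
  intro j
  rw [List.getElem?_set]
  have hlt : i < t.length := by
    by_contra hge
    rw [List.getElem?_eq_none (by omega)] at h
    simp at h
  have hv : t[i] = "" := by
    have := List.getElem?_eq_getElem hlt
    rw [this] at h
    exact Option.some.inj h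
  by_cases hij : i = j
  · subst hij; simp [hlt, hv]
  · simp [hij]

-- the while loop writes the non-'' tiles into the next gaps ≥ spot, in order;
-- a '' tile re-targets the same gap and is overwritten (or leaves it a gap)
theorem fillLoopA_spec : ∀ (perm t : List String) (spot : Nat) (pre suf : List Nat),
    gapIdxA t 0 = pre ++ suf → (∀ i ∈ pre, i < spot) → (∀ i ∈ suf, spot ≤ i) →
    (pre ++ suf).Nodup → perm.length ≤ suf.length →
    fillLoopA t perm spot =
      ((suf.take (perm.filter (fun w => w ≠ "")).length).zip
        (perm.filter (fun w => w ≠ ""))).foldl (fun r pw => r.set pw.1 pw.2) t ∧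
    gapIdxA (fillLoopA t perm spot) 0 =
      pre ++ suf.drop (perm.filter (fun w => w ≠ "")).length := by
  intro perm
  induction perm with
  | nil =>
      intro t spot pre suf hg _ _ _ _
      exact ⟨rfl, by simpa using hg⟩
  | cons w rest ih =>
      intro t spot pre suf hg hpre hsuf hnd hlen
      -- suf is nonempty
      cases suf with
      | nil => simp at hlen
      | cons s0 suf' =>
          -- the index? step finds s0
          have hidx : (PySem.List.index? (t.drop spot) "").map (fun j => spot + j) =
              some s0 := by
            rw [gapIdxA_index? (t.drop spot) spot]
            have hd : gapIdxA (t.drop spot) (0 + spot) =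
                (gapIdxA t 0).filter (fun i => 0 + spot ≤ i) := gapIdxA_drop t spot 0
            simp only [Nat.zero_add] at hd
            rw [hd, hg, filter_ge_split pre (s0 :: suf') spot hpre hsuf]
            rfl
          obtain ⟨j, hj, hj2⟩ : ∃ j, PySem.List.index? (t.drop spot) "" = some j ∧
              spot + j = s0 := by
            cases hidx' : PySem.List.index? (t.drop spot) "" with
            | none => rw [hidx'] at hidx; simp at hidx
            | some j => rw [hidx'] at hidx; simp at hidx; exact ⟨j, rfl, hidx⟩
          have hstep : fillLoopA t (w :: rest) spot = fillLoopA (t.set s0 w) rest spot := by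
            simp only [fillLoopA, hj, hj2]
          by_cases hw : w = ""
          · -- blank tile: the write re-creates the same gap; nothing changes
            have hs0g : s0 ∈ gapIdxA t 0 := by rw [hg]; simp
            obtain ⟨j0, hj0, hj0e, hj0g⟩ := gapIdxA_mem t 0 s0 hs0g
            have hnoop : t.set s0 w = t := by
              rw [hw]
              have : s0 = j0 := by omega
              rw [this]
              exact set_gap_self t j0 hj0g
            have hlen' : rest.length ≤ (s0 :: suf').length := by simp at hlen ⊢; omega
            obtain ⟨e1, e2⟩ := ih t spot pre (s0 :: suf') hg hpre hsuf hnd hlen'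
            have hfw : (w :: rest).filter (fun w => w ≠ "") =
                rest.filter (fun w => w ≠ "") := by
              simp [hw]
            rw [hstep, hnoop, hfw]
            exact ⟨e1, e2⟩
          · -- real tile: it lands in gap s0, which stops being a gap
            have hs0pre : s0 ∉ pre := by
              intro h; have := hpre s0 h; have := hsuf s0 (by simp); omega
            have hs0suf' : s0 ∉ suf' := by
              have := (List.nodup_append.1 hnd).2.1
              simp at this; exact this.1
            have hgaps' : gapIdxA (t.set s0 w) 0 = pre ++ suf' := by
              rw [gapIdxA_set t s0 w 0 hw, hg]
              simp only [Nat.zero_add]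
              rw [List.filter_append]
              have h1 : pre.filter (fun i => i ≠ s0) = pre := by
                rw [List.filter_eq_self]; intro i hi; simp
                intro h; exact hs0pre (h ▸ hi)
              have h2 : (s0 :: suf').filter (fun i => i ≠ s0) = suf' := by
                simp only [List.filter_cons]
                have hd0 : (decide (s0 ≠ s0)) = false := by simp
                rw [hd0]
                simp only [Bool.false_eq_true, if_false]
                rw [List.filter_eq_self]; intro i hi; simp
                intro h; exact hs0suf' (h ▸ hi)
              rw [h1, h2]
            have hnd' : (pre ++ suf').Nodup := by
              refine List.Nodup.sublist ?_ hnd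
              exact List.Sublist.append_left (by simp) pre
            have hsuf' : ∀ i ∈ suf', spot ≤ i := fun i hi => hsuf i (by simp [hi])
            have hlen' : rest.length ≤ suf'.length := by simp at hlen; omega
            obtain ⟨e1, e2⟩ := ih (t.set s0 w) spot pre suf' hgaps' hpre hsuf' hnd' hlen'
            have hfw : (w :: rest).filter (fun w => w ≠ "") =
                w :: rest.filter (fun w => w ≠ "") := by
              simp [hw]
            constructor
            · rw [hstep, e1, hfw]
              simp [List.take_succ_cons, List.zip_cons_cons]
            · rw [hstep, e2, hfw]
              simp

-- sortedness facts about E = gapIdxA t 0 split at position g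
theorem gapIdx_split_facts (E : List Nat) (hs : E.Pairwise (· < ·)) (g : Nat)
    (hg : g < E.length) :
    (∀ i ∈ E.take g, i < E.getD g 0) ∧ (∀ i ∈ E.drop g, E.getD g 0 ≤ i) := by
  have hgety : E.getD g 0 = E[g] := by
    simp [List.getD, List.getElem?_eq_getElem hg]
  constructor
  · intro i hi
    obtain ⟨k, hk, hik⟩ := List.getElem_of_mem (by simpa using hi)
    have hklen : (E.take g).length = min g E.length := List.length_take
    have hk' : k < g := by omega
    have hidx : (E.take g)[k] = E[k]'(by omega) := by
      rw [List.getElem_take]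
    rw [hgety, ← hik, hidx]
    exact List.pairwise_iff_getElem.1 hs k g (by omega) hg (by omega)
  · intro i hi
    obtain ⟨k, hk, hik⟩ := List.getElem_of_mem (by simpa using hi)
    have hklen : (E.drop g).length = E.length - g := List.length_drop
    have hgk : g + k < E.length := by omega
    have hidx : (E.drop g)[k] = E[g + k]'hgk := by
      rw [List.getElem_drop]
    rw [hgety, ← hik, hidx]
    rcases Nat.eq_zero_or_pos k with hk0 | hk0
    · subst hk0; simp
    · have := List.pairwise_iff_getElem.1 hs g (g + k) hg hgk (by omega)
      omega

-- the per-(perm, g) item of A equals the per-(perm, g) item of B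
set_option maxHeartbeats 2000000 in
theorem item_eq (t : List String) (perm : List String) (g : Nat)
    (hne : perm ≠ [])
    (hglt : g + perm.length ≤ (gapIdxA t 0).length) :
    (fun ft => ((wordA ft.1), ft.2)) (fill_template_onceA t perm g) =
      (let empties := gapIdxA t 0
       let tiles := perm.filter (fun w => w ≠ "")
       let m := tiles.length
       let row := (((empties.drop g).take m).zip tiles).foldl
         (fun r pw => r.set pw.1 pw.2) t
       let start := if g = 0 then 0 else empties.getD (g - 1) 0 + 1
       let e := if empties.length ≤ g + m then 15 else empties.getD (g + m) 0
       (wordA ((row.drop start).take (e - start)), start)) := by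
  have hk1 : 1 ≤ perm.length := by
    cases perm with | nil => exact absurd rfl hne | cons a b => simp
  set E := gapIdxA t 0 with hE
  have hg : g < E.length := by omega
  have hs : E.Pairwise (· < ·) := gapIdxA_sorted t 0
  have hnd : E.Nodup := hs.imp (fun h => Nat.ne_of_lt h)
  set spot := E.getD g 0 with hspot
  obtain ⟨hpre, hsuf⟩ := gapIdx_split_facts E hs g hg
  have hsplit : gapIdxA t 0 = E.take g ++ E.drop g := by rw [← hE]; simp
  have hndsplit : (E.take g ++ E.drop g).Nodup := by simpa using hnd
  have hlen : perm.length ≤ (E.drop g).length := by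
    rw [List.length_drop]; omega
  set m := (perm.filter (fun w => w ≠ "")).length with hm
  have hmle : m ≤ perm.length := List.length_filter_le _ _
  obtain ⟨hfill, hgaps2⟩ := fillLoopA_spec perm t spot (E.take g) (E.drop g)
    hsplit hpre hsuf hndsplit hlen
  -- unfold A's item
  show ((wordA (fill_template_onceA t perm g).1), (fill_template_onceA t perm g).2) = _
  have hsame : fill_template_onceA t perm g =
      (let t2 := fillLoopA t perm spot
       let gapsBefore := gapIdxA (t2.take spot) 0
       let start := match gapsBefore.getLast? with | some x => x + 1 | none => 0
       let gapsAfter := gapIdxA (t2.drop spot) 0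
       let e := match gapsAfter.head? with | some x => spot + x | none => 15
       ((t2.drop start).take (e - start), start)) := rfl
  rw [hsame]
  simp only []
  set t2 := fillLoopA t perm spot with ht2
  -- gaps of t2
  have hg2 : gapIdxA t2 0 = E.take g ++ E.drop (g + m) := by
    rw [ht2, hgaps2, List.drop_drop]
  have hpre2 : ∀ i ∈ E.take g, i < spot := hpre
  have hsuf2 : ∀ i ∈ E.drop (g + m), spot ≤ i := by
    intro i hi
    have : i ∈ E.drop g := by
      have : E.drop (g + m) = (E.drop g).drop m := by
        rw [List.drop_drop]
      rw [this] at hi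
      exact List.mem_of_mem_drop hi
    exact hsuf i this
  -- gapsBefore = E.take g
  have hgb : gapIdxA (t2.take spot) 0 = E.take g := by
    have := gapIdxA_take t2 spot 0
    simp only [Nat.zero_add] at this
    rw [this, hg2, filter_lt_split _ _ spot hpre2 hsuf2]
  -- start
  have hstart : (match (gapIdxA (t2.take spot) 0).getLast? with
      | some x => x + 1 | none => 0) = (if g = 0 then 0 else E.getD (g - 1) 0 + 1) := by
    rw [hgb]
    cases g with
    | zero => simp
    | succ g' =>
        have hg' : g' < E.length := by omega
        have htk : (E.take (g' + 1)).getLast? = some E[g'] := by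
          rw [List.getLast?_eq_getElem?]
          have hlen : (E.take (g' + 1)).length = g' + 1 := by
            rw [List.length_take]; omega
          rw [hlen]
          simp only [Nat.add_sub_cancel]
          rw [List.getElem?_take_of_lt (by omega), List.getElem?_eq_getElem hg']
        rw [htk]
        simp [List.getD, List.getElem?_eq_getElem hg']
  -- end
  have hgafter : (gapIdxA (t2.drop spot) 0).map (fun i => i + spot) =
      E.drop (g + m) := by
    have hd : gapIdxA (t2.drop spot) (0 + spot) =
        (gapIdxA t2 0).filter (fun i => 0 + spot ≤ i) := gapIdxA_drop t2 spot 0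
    simp only [Nat.zero_add] at hd
    have hshift : ∀ (l : List String) (k : Nat),
        gapIdxA l k = (gapIdxA l 0).map (fun i => i + k) := by
      intro l
      induction l with
      | nil => intro k; simp [gapIdxA]
      | cons x r ihl =>
          intro k
          by_cases hx : x = ""
          · simp only [gapIdxA, if_pos hx, List.map_cons, Nat.zero_add]
            rw [ihl (k + 1), ihl 1, List.map_map]
            simp [Function.comp_def, Nat.add_assoc]
            omega
          · simp only [gapIdxA, if_neg hx]
            rw [ihl (k + 1), ihl 1, List.map_map]
            simp [Function.comp_def, Nat.add_assoc]
            omega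
    have := hshift (t2.drop spot) spot
    rw [this] at hd
    rw [hd, hg2, filter_ge_split _ _ spot hpre2 hsuf2]
  have hend : (match (gapIdxA (t2.drop spot) 0).head? with
      | some x => spot + x | none => 15) =
      (if E.length ≤ g + m then 15 else E.getD (g + m) 0) := by
    by_cases hc : E.length ≤ g + m
    · have : E.drop (g + m) = [] := List.drop_eq_nil_of_le hc
      rw [this] at hgafter
      have : gapIdxA (t2.drop spot) 0 = [] := by
        cases h : gapIdxA (t2.drop spot) 0 with
        | nil => rfl
        | cons a b => rw [h] at hgafter; simp at hgafter
      rw [this]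
      simp [hc]
    · have hlt : g + m < E.length := by omega
      have hd : E.drop (g + m) ≠ [] := by
        intro h
        have := List.drop_eq_nil_iff.1 h
        omega
      cases h : gapIdxA (t2.drop spot) 0 with
      | nil => rw [h] at hgafter; simp at hgafter; omega
      | cons a b =>
          rw [h] at hgafter
          have hhead : (E.drop (g + m)).head? = some (a + spot) := by
            rw [← hgafter]; rfl
          have hhead2 : (E.drop (g + m)).head? = E[g + m]? := by
            rw [List.head?_drop]
          rw [hhead2] at hhead
          simp only [h, List.head?_cons, if_neg hc]
          have : E.getD (g + m) 0 = a + spot := by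
            simp [List.getD, hhead]
          rw [this, Nat.add_comm]
  -- row
  have hrow : t2 = (((E.drop g).take m).zip (perm.filter (fun w => w ≠ ""))).foldl
      (fun r pw => r.set pw.1 pw.2) t := hfill
  rw [hstart, hend, hrow]

-- the countP total of A is the length of the gap table
theorem total_eq (t : List String) :
    t.countP (fun x => x == "") = (gapIdxA t 0).length := (gapIdxA_length t 0).symm

theorem emptiesB_eq (t : List String) : emptiesB t = gapIdxA t 0 := by
  rw [emptiesB, gapIdxA_eq_emptiesB t 0]

-- the inner fold over gap numbers, A-shaped vs B-shaped
set_option maxHeartbeats 2000000 in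
theorem inner_fold_eq (template p : List String) (hp : p ≠ [])
    (d0 : PySem.Dict (List String) (List Int)) :
    (List.range (template.countP (fun x => x == "") + 1 - p.length)).foldl
      (fun d g =>
        let ft := fill_template_onceA template p g
        dictStepA d (wordA ft.1) ft.2) d0 =
    (List.range ((gapIdxA template 0).length + 1 - p.length)).foldl
      (fun d g =>
        let tiles := p.filter (fun w => w ≠ "")
        let m := tiles.length
        let row := ((((gapIdxA template 0).drop g).take m).zip tiles).foldl
          (fun r pw => r.set pw.1 pw.2) template
        let start := if g = 0 then 0 else (gapIdxA template 0).getD (g - 1) 0 + 1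
        let e := if (gapIdxA template 0).length ≤ g + m then 15
          else (gapIdxA template 0).getD (g + m) 0
        dictStepA d (wordA ((row.drop start).take (e - start))) start) d0 := by
  rw [total_eq]
  apply PySem.List.foldl_congr_mem
  intro d1 g hg
  have hgmem : g + p.length ≤ (gapIdxA template 0).length := by
    have h1 := List.mem_range.1 hg
    have hk1 : 1 ≤ p.length := by
      cases hp0 : p with
      | nil => exact absurd hp0 hp
      | cons a b => simp
    omega
  have hitem := item_eq template p g hp hgmem
  have h1 := congrArg Prod.fst hitem
  have h2 := congrArg Prod.snd hitem
  simp only [] at h1 h2 ⊢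
  rw [h1, h2]

set_option maxHeartbeats 2000000 in
theorem outer_fold_eq (template : List String) :
    ∀ (perms : List (List String)), (∀ p ∈ perms, p ≠ []) →
    ∀ d, perms.foldl (fun d perm =>
        let total := template.countP (fun x => x == "")
        (List.range (total + 1 - perm.length)).foldl (fun d g =>
          let ft := fill_template_onceA template perm g
          dictStepA d (wordA ft.1) ft.2) d) d =
      perms.foldl (fun d perm =>
        let tiles := perm.filter (fun w => w ≠ "")
        let m := tiles.length
        (List.range ((gapIdxA template 0).length + 1 - perm.length)).foldl (fun d g =>
          let row := ((((gapIdxA template 0).drop g).take m).zip tiles).foldl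
            (fun r pw => r.set pw.1 pw.2) template
          let start := if g = 0 then 0 else (gapIdxA template 0).getD (g - 1) 0 + 1
          let e := if (gapIdxA template 0).length ≤ g + m then 15
            else (gapIdxA template 0).getD (g + m) 0
          dictStepA d (wordA ((row.drop start).take (e - start))) start) d) d := by
  intro perms
  induction perms with
  | nil => intro _ d; rfl
  | cons p ps ihp =>
      intro hpre d
      simp only [List.foldl_cons]
      rw [inner_fold_eq template p (hpre p (by simp)) d]
      exact ihp (fun q hq => hpre q (by simp [hq])) _

-- ===== VERDICT =====

set_option maxHeartbeats 2000000 in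
theorem fill_templates_spec : Claim_equal_fill_templates := by
  intro template perms _ hpre
  unfold Spec_fill_templates
  unfold fill_templates fill_templates_alt
  simp only [emptiesB_eq]
  congr 1
  exact outer_fold_eq template perms hpre PySem.Dict.empty
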